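-- pv_equiv track=rewrite | github.com/iamonur/temp_parser | nicer_parser.py | parse_moves
-- ===== SOURCE A (Python) =====
-- def parse_moves(moves):
--     avatar = []
--     opponent = []
--     if len(moves) == 0:
--         return avatar, opponent
--     else:
--         for move in moves:
--             if move[0] == "Avatar":
--                 avatar.append(move[1])
--             elif move[0] == "Opponent":
--                 opponent.append(move[1])
--             else:
--                 return avatar,opponent
-- ===== SOURCE B (Python) =====
-- from itertools import takewhile
--
-- def parse_moves(moves):
--     prefix = list(takewhile(lambda m: m[0] in ("Avatar", "Opponent"), moves))
--     avatar = [m[1] for m in prefix if m[0] == "Avatar"]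
--     opponent = [m[1] for m in prefix if m[0] == "Opponent"]
--     return avatar, opponent
-- ===== Notes on version B (the rewrite author's own statement) =====
-- stated objective: idiomatic
-- what changed: Replaces the single accumulator loop with an early return by takewhile to cut the valid prefix followed by two filtering comprehensions, removing the empty-list guard and the in-loop return.
-- outside the precondition, e.g. on parse_moves([('Avatar', 'x')]): A returns None, B returns (['x'], [])
import Mathlib
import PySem

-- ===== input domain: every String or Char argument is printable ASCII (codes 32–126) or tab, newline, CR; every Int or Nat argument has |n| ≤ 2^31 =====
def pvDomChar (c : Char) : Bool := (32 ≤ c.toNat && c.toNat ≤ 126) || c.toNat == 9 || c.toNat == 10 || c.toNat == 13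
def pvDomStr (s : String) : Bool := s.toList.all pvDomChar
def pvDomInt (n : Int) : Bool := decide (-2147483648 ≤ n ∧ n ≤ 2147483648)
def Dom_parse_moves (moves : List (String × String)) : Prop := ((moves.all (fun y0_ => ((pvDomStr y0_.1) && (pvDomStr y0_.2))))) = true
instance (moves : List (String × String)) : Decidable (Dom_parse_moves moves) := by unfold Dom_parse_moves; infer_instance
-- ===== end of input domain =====

-- B replaces A's accumulator loop (with its in-loop early return and empty-list guard)
-- by a takewhile prefix cut followed by two filtering passes. Return-value equivalence only.

-- ===== PORT A =====
-- A's for-loop with two accumulators and an early return on a foreign tag.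
-- On exhaustion of a nonempty list Python A returns None (no value of the tuple type);
-- Pre_ excludes those inputs, the port's value there is the accumulators.
def parseMovesLoopA : List (String × String) → List String → List String → List String × List String
  | [], avatar, opponent => (avatar, opponent)
  | move :: rest, avatar, opponent =>
      if move.1 == "Avatar" then parseMovesLoopA rest (avatar ++ [move.2]) opponent
      else if move.1 == "Opponent" then parseMovesLoopA rest avatar (opponent ++ [move.2])
      else (avatar, opponent)

def parse_moves (moves : List (String × String)) : List String × List String :=
  if moves.length = 0 then ([], []) else parseMovesLoopA moves [] []

-- ===== PORT B =====
def parse_moves_alt (moves : List (String × String)) : List String × List String :=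
  let pre := moves.takeWhile (fun m => m.1 == "Avatar" || m.1 == "Opponent")
  ((pre.filter (fun m => m.1 == "Avatar")).map (fun m => m.2),
   (pre.filter (fun m => m.1 == "Opponent")).map (fun m => m.2))

-- ===== PRECONDITION & SPEC =====
-- Pre_ excludes nonempty lists whose tags are all "Avatar"/"Opponent": there Python A
-- falls off the end of its loop and returns None, no value of the declared tuple type.
def Pre_parse_moves (moves : List (String × String)) : Prop :=
  moves = [] ∨ (moves.any (fun m => !(m.1 == "Avatar" || m.1 == "Opponent"))) = true
instance (moves : List (String × String)) : Decidable (Pre_parse_moves moves) := by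
  unfold Pre_parse_moves; infer_instance

def pvWitness_parse_moves : (List (String × String)) := [("Avatar", "a1"), ("end", "")]

def Spec_parse_moves (moves : List (String × String)) (out : List String × List String) : Prop := out = parse_moves_alt moves
instance (moves : List (String × String)) (out : List String × List String) : Decidable (Spec_parse_moves moves out) := by unfold Spec_parse_moves; infer_instance

-- ===== CLAIM (what is proved, stated in full; the proofs are below) =====
def Claim_equal_parse_moves : Prop := ∀ (moves : List (String × String)), Dom_parse_moves moves → Pre_parse_moves moves → Spec_parse_moves moves (parse_moves moves)

-- ===== LEMMAS AND PROOFS =====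
theorem parseMovesLoopA_eq (ms : List (String × String)) (av op : List String) :
    parseMovesLoopA ms av op =
      (av ++ ((ms.takeWhile (fun m => m.1 == "Avatar" || m.1 == "Opponent")).filter
                (fun m => m.1 == "Avatar")).map (fun m => m.2),
       op ++ ((ms.takeWhile (fun m => m.1 == "Avatar" || m.1 == "Opponent")).filter
                (fun m => m.1 == "Opponent")).map (fun m => m.2)) := by
  induction ms generalizing av op with
  | nil => simp [parseMovesLoopA]
  | cons m rest ih =>
      by_cases h1 : m.1 = "Avatar"
      · simp [parseMovesLoopA, h1, ih]
      · by_cases h2 : m.1 = "Opponent"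
        · simp [parseMovesLoopA, h2, ih]
        · simp [parseMovesLoopA, h1, h2]

-- ===== VERDICT (by name: the statement is the Claim_ definition above) =====
theorem parse_moves_spec : Claim_equal_parse_moves := by
  intro moves _ _
  unfold Spec_parse_moves parse_moves parse_moves_alt
  cases moves with
  | nil => simp
  | cons m rest => simp [parseMovesLoopA_eq]
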